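-- pv_equiv track=rewrite | github.com/pypi-data/pypi-mirror-392 | packages/whai/whai-0.8.2.tar.gz/whai-0.8.2/whai/context/session_reader.py | _match_whai_block
-- ===== SOURCE A (Python) =====
-- from typing import Optional, Tuple
--
-- def _match_whai_block(
--     normalized_cmd: str,
--     whai_blocks: list[tuple[str, str]],
--     start_idx: int,
-- ) -> Optional[int]:
--     for idx in range(start_idx, len(whai_blocks)):
--         cmd, _ = whai_blocks[idx]
--         if cmd == "__PRE_COMMAND__":
--             continue
--         if normalized_cmd == cmd:
--             return idx
--
--     # Fallback for chained commands
--     parts = normalized_cmd.split()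
--     if "whai" not in parts:
--         return None
--
--     whai_index = parts.index("whai")
--     command_segment = " ".join(parts[whai_index:])
--
--     for idx in range(start_idx, len(whai_blocks)):
--         cmd, _ = whai_blocks[idx]
--         if cmd == "__PRE_COMMAND__":
--             continue
--         if cmd in command_segment or command_segment in cmd:
--             return idx
--
--     return None
-- ===== SOURCE B (Python) =====
-- from typing import Optional
--
--
-- def _match_whai_block(
--     normalized_cmd: str,
--     whai_blocks: list[tuple[str, str]],
--     start_idx: int,
-- ) -> Optional[int]:
--     # Precompute the chained-command fallback segment once.
--     parts = normalized_cmd.split()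
--     have_fallback = "whai" in parts
--     command_segment = (
--         " ".join(parts[parts.index("whai"):]) if have_fallback else ""
--     )
--
--     candidate: Optional[int] = None
--     for idx in range(start_idx, len(whai_blocks)):
--         cmd, _ = whai_blocks[idx]
--         if cmd == "__PRE_COMMAND__":
--             continue
--         if normalized_cmd == cmd:
--             return idx
--         if (
--             have_fallback
--             and candidate is None
--             and (cmd in command_segment or command_segment in cmd)
--         ):
--             candidate = idx
--     return candidate
-- ===== Notes on version B (the rewrite author's own statement) =====
-- stated objective: simpler
-- what changed: Replaces A's two sequential scans of the block list with a single pass that returns an exact match immediately and remembers the first substring-fallback candidate, returned only if no exact match exists.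
import Mathlib
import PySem

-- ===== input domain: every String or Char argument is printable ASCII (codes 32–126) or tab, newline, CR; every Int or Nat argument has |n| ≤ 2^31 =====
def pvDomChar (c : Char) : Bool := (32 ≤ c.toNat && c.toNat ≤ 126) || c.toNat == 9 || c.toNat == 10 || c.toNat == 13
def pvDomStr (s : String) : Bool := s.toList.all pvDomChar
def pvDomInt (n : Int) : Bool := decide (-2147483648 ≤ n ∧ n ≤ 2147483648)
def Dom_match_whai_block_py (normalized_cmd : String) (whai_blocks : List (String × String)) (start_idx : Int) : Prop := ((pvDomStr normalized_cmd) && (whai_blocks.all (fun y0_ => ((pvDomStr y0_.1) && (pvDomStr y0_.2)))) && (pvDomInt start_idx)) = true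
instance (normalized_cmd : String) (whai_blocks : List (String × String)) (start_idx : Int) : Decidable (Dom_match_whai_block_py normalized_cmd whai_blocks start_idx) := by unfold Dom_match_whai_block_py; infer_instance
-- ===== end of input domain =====

-- B replaces A's two sequential scans by a single pass that returns an exact match
-- immediately and remembers the first substring-fallback candidate (objective: simpler).

-- ===== PORT A =====
-- first for-loop of A: exact match
def pvAScan1 (nc : String) (blocks : List (String × String)) : List Int → Option Int
  | [] => none
  | i :: rest =>
    let cmd := (PySem.List.pyGetD blocks i ("", "")).1
    if cmd = "__PRE_COMMAND__" then pvAScan1 nc blocks rest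
    else if nc = cmd then some i
    else pvAScan1 nc blocks rest

-- second for-loop of A: substring fallback
def pvAScan2 (seg : String) (blocks : List (String × String)) : List Int → Option Int
  | [] => none
  | i :: rest =>
    let cmd := (PySem.List.pyGetD blocks i ("", "")).1
    if cmd = "__PRE_COMMAND__" then pvAScan2 seg blocks rest
    else if PySem.Str.isIn cmd seg || PySem.Str.isIn seg cmd then some i
    else pvAScan2 seg blocks rest

def match_whai_block_py (normalized_cmd : String) (whai_blocks : List (String × String)) (start_idx : Int) : Option Int :=
  let idxs := PySem.List.pyRange start_idx (whai_blocks.length : Int) 1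
  match pvAScan1 normalized_cmd whai_blocks idxs with
  | some i => some i
  | none =>
    let parts := PySem.Str.split₀ normalized_cmd
    if !(parts.contains "whai") then none
    else
      let whai_index := (PySem.List.index? parts "whai").getD 0
      let command_segment := PySem.Str.join " " (PySem.List.slice parts (some (whai_index : Int)) none)
      pvAScan2 command_segment whai_blocks idxs

-- ===== PORT B =====
-- the single pass of B, carrying the first substring candidate
def pvBLoop (nc : String) (blocks : List (String × String)) (fb : Bool) (seg : String) : List Int → Option Int → Option Int
  | [], cand => cand
  | i :: rest, cand =>
    let cmd := (PySem.List.pyGetD blocks i ("", "")).1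
    if cmd = "__PRE_COMMAND__" then pvBLoop nc blocks fb seg rest cand
    else if nc = cmd then some i
    else if fb && cand.isNone && (PySem.Str.isIn cmd seg || PySem.Str.isIn seg cmd) then
      pvBLoop nc blocks fb seg rest (some i)
    else pvBLoop nc blocks fb seg rest cand

def match_whai_block_py_alt (normalized_cmd : String) (whai_blocks : List (String × String)) (start_idx : Int) : Option Int :=
  let parts := PySem.Str.split₀ normalized_cmd
  let have_fallback := parts.contains "whai"
  let command_segment :=
    if have_fallback then
      PySem.Str.join " " (PySem.List.slice parts (some (((PySem.List.index? parts "whai").getD 0 : Nat) : Int)) none)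
    else ""
  pvBLoop normalized_cmd whai_blocks have_fallback command_segment
    (PySem.List.pyRange start_idx (whai_blocks.length : Int) 1) none

-- ===== PRECONDITION & SPEC =====
-- Pre_ excludes exactly the inputs with start_idx < -len(whai_blocks), where the Python A
-- (and B alike) raises IndexError indexing whai_blocks at an out-of-range negative index.
def Pre_match_whai_block_py (normalized_cmd : String) (whai_blocks : List (String × String)) (start_idx : Int) : Prop :=
  -(whai_blocks.length : Int) ≤ start_idx
instance (normalized_cmd : String) (whai_blocks : List (String × String)) (start_idx : Int) : Decidable (Pre_match_whai_block_py normalized_cmd whai_blocks start_idx) := by unfold Pre_match_whai_block_py; infer_instance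

def pvWitness_match_whai_block_py : String × (List (String × String)) × Int :=
  ("whai ls", [("__PRE_COMMAND__", "x"), ("ls", "out")], 0)

def Spec_match_whai_block_py (normalized_cmd : String) (whai_blocks : List (String × String)) (start_idx : Int) (out : Option Int) : Prop := out = match_whai_block_py_alt normalized_cmd whai_blocks start_idx
instance (normalized_cmd : String) (whai_blocks : List (String × String)) (start_idx : Int) (out : Option Int) : Decidable (Spec_match_whai_block_py normalized_cmd whai_blocks start_idx out) := by unfold Spec_match_whai_block_py; infer_instance

-- ===== CLAIM (what is proved, stated in full; the proofs are below) =====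
def Claim_equal_match_whai_block_py : Prop := ∀ (normalized_cmd : String) (whai_blocks : List (String × String)) (start_idx : Int), Dom_match_whai_block_py normalized_cmd whai_blocks start_idx → Pre_match_whai_block_py normalized_cmd whai_blocks start_idx → Spec_match_whai_block_py normalized_cmd whai_blocks start_idx (match_whai_block_py normalized_cmd whai_blocks start_idx)

-- ===== LEMMAS AND PROOFS =====

-- The single pass equals: first exact match, else the carried candidate, else (if fallback) the first substring match.
lemma pvBLoop_eq (nc : String) (blocks : List (String × String)) (fb : Bool) (seg : String)
    (l : List Int) (cand : Option Int) :
    pvBLoop nc blocks fb seg l cand =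
      match pvAScan1 nc blocks l with
      | some i => some i
      | none =>
        match cand with
        | some c => some c
        | none => if fb then pvAScan2 seg blocks l else none := by
  induction l generalizing cand with
  | nil =>
    cases cand <;> cases fb <;> simp [pvBLoop, pvAScan1, pvAScan2]
  | cons i rest ih =>
    simp only [pvBLoop, pvAScan1, pvAScan2]
    by_cases hpre : (PySem.List.pyGetD blocks i ("", "")).1 = "__PRE_COMMAND__"
    · simp [hpre, ih]
    · by_cases hex : nc = (PySem.List.pyGetD blocks i ("", "")).1
      · simp [hpre, hex]
      · cases cand with
        | some c => simp [hpre, hex, ih]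
        | none =>
          cases fb with
          | false => simp [hpre, hex, ih]
          | true =>
            simp [hpre, hex, ih]
            cases pvAScan1 nc blocks rest <;> split <;> simp

theorem match_whai_block_py_eq (normalized_cmd : String) (whai_blocks : List (String × String)) (start_idx : Int) :
    match_whai_block_py normalized_cmd whai_blocks start_idx
      = match_whai_block_py_alt normalized_cmd whai_blocks start_idx := by
  unfold match_whai_block_py match_whai_block_py_alt
  rw [pvBLoop_eq]
  cases h1 : pvAScan1 normalized_cmd whai_blocks
      (PySem.List.pyRange start_idx (whai_blocks.length : Int) 1) with
  | some i => simp [h1]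
  | none =>
    by_cases hfb : "whai" ∈ PySem.Str.split₀ normalized_cmd
    · simp [h1, hfb]
    · simp [h1, hfb]

-- ===== VERDICT (by name: the statement is the Claim_ definition above) =====
theorem match_whai_block_py_spec : Claim_equal_match_whai_block_py := by
  intro nc blocks si _ _
  unfold Spec_match_whai_block_py
  exact match_whai_block_py_eq nc blocks si
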